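-- pv_equiv track=rewrite | github.com/Ervin518/Python | lab_4/lab_4_zad_8_2.py | gener
-- ===== SOURCE A (Python) =====
-- def gener(n):
--     wartosc = 4
--     for i in range(n):
--         yield wartosc
--         if i == 0:
--             wartosc = 16
--         else:
--             wartosc = wartosc * 2
-- ===== SOURCE B (Python) =====
-- def gener(n):
--     for i in range(n):
--         yield 4 if i == 0 else 1 << (i + 3)
-- ===== Notes on version B (the rewrite author's own statement) =====
-- stated objective: simpler
-- what changed: Replaced the carried mutable accumulator (wartosc, updated by a branch on each iteration) with a stateless closed form: each yielded value is computed directly from the loop index by a bit shift, with a special case for the first index.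
import Mathlib
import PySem

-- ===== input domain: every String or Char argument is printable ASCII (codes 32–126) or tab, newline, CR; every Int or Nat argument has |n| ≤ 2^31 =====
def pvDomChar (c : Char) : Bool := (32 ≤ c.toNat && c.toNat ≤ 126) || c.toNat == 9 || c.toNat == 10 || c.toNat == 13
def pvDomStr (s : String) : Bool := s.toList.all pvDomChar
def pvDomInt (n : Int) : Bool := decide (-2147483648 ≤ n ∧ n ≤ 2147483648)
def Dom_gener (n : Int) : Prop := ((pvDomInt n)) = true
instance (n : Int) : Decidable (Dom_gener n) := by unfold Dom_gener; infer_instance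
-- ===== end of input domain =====

-- B drops A's carried accumulator and computes each yielded value in closed form from the index (simpler).

-- ===== PORT A =====
-- generator: the list of yielded values; state = (yielded so far, wartosc)
def gener (n : Int) : List Int :=
  ((PySem.List.pyRange 0 n 1).foldl
    (fun s i => (s.1 ++ [s.2], if i = 0 then (16 : Int) else s.2 * 2))
    ([], 4)).1

-- ===== PORT B =====
def gener_alt (n : Int) : List Int :=
  (PySem.List.pyRange 0 n 1).map (fun (i : Int) => if i = 0 then (4 : Int) else (1 : Int) <<< (i + 3).toNat)

-- ===== PRECONDITION & SPEC =====
def Spec_gener (n : Int) (out : List Int) : Prop := out = gener_alt n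
instance (n : Int) (out : List Int) : Decidable (Spec_gener n out) := by unfold Spec_gener; infer_instance

-- ===== CLAIM (what is proved, stated in full; the proofs are below) =====
def Claim_equal_gener : Prop := ∀ (n : Int), Dom_gener n → Spec_gener n (gener n)

-- ===== LEMMAS AND PROOFS =====
lemma gener_fold_char (m : Nat) :
    (PySem.List.pyRange 0 (m : Int) 1).foldl
      (fun s i => (s.1 ++ [s.2], if i = 0 then (16 : Int) else s.2 * 2)) ([], 4)
    = ((PySem.List.pyRange 0 (m : Int) 1).map (fun (i : Int) => if i = 0 then (4 : Int) else (1 : Int) <<< (i + 3).toNat),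
       if m = 0 then (4 : Int) else 2 ^ (m + 3)) := by
  induction m with
  | zero => simp [PySem.List.pyRange_one_eq_nil]
  | succ k ih =>
    have h : PySem.List.pyRange 0 ((k : Int) + 1) 1
        = PySem.List.pyRange 0 (k : Int) 1 ++ [(k : Int)] :=
      PySem.List.pyRange_one_succ_right (by exact_mod_cast Nat.zero_le k)
    push_cast
    rw [h, List.foldl_append, ih, List.map_append]
    rcases Nat.eq_zero_or_pos k with hk | hk
    · subst hk; simp
    · have hk0 : (k : Int) ≠ 0 := by exact_mod_cast Nat.pos_iff_ne_zero.mp hk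
      have ht : ((k : Int) + 3).toNat = k + 3 := by omega
      simp only [List.foldl_cons, List.foldl_nil, List.map_cons, List.map_nil, if_neg hk0,
        if_neg (Nat.pos_iff_ne_zero.mp hk), ht, Prod.mk.injEq, Int.shiftLeft_eq, one_mul]
      exact ⟨trivial, by ring⟩

-- ===== VERDICT (by name: the statement is the Claim_ definition above) =====
theorem gener_spec : Claim_equal_gener := by
  intro n _
  unfold Spec_gener gener gener_alt
  rcases le_or_gt n 0 with h | h
  · rw [PySem.List.pyRange_one_eq_nil h]; rfl
  · have hn : ((n.toNat : Int)) = n := Int.toNat_of_nonneg h.le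
    rw [← hn, gener_fold_char]
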